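-- pv_equiv track=rewrite | github.com/TobiasK87/project_euler | Problem68.py | combs
-- ===== SOURCE A (Python) =====
-- def combs(length):
--     ls=[]
--     for i in range(1,11):
--         for j in range(1,11):
--             for k in range(1,11):
--                 if i+j+k==length and not i==j and not i==k and not j==k:
--                     ls.append([i,j,k])
--     ls = [i for i in ls if 10 not in i or i[0]==10]
--     return ls
-- ===== SOURCE B (Python) =====
-- def combs(length):
--     out = []
--     for i in range(1, 11):
--         for j in range(1, 11):
--             k = length - i - j
--             if 1 <= k <= 10 and i != j and i != k and j != k and (10 not in (i, j, k) or i == 10):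
--                 out.append([i, j, k])
--     return out
-- ===== Notes on version B (the rewrite author's own statement) =====
-- stated objective: simpler
-- what changed: A's innermost loop over k in 1..10 is removed: B computes k = length - i - j directly and checks 1 <= k <= 10, appending inside the double loop, so the separate post-filter pass also disappears (folded into the append condition).
import Mathlib
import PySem

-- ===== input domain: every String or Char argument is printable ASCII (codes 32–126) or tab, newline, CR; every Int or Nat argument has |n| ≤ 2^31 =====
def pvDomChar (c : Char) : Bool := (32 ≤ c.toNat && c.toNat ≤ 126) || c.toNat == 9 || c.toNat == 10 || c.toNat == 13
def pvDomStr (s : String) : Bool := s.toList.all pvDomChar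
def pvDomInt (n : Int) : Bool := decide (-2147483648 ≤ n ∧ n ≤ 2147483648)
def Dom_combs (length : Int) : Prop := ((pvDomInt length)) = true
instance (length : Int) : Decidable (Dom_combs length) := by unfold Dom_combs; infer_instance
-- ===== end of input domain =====

-- B replaces A's innermost k-loop by computing k = length - i - j directly (simpler, one pass less).

-- ===== PORT A =====
def combs (length : Int) : List (List Int) :=
  let ls : List (List Int) :=
    (PySem.List.pyRange 1 11 1).foldl (fun ls i =>
      (PySem.List.pyRange 1 11 1).foldl (fun ls j =>
        (PySem.List.pyRange 1 11 1).foldl (fun ls k =>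
          if (i + j + k == length) && !(i == j) && !(i == k) && !(j == k) then
            ls ++ [[i, j, k]]
          else ls) ls) ls) []
  ls.filter (fun l => !(l.contains (10 : Int)) || (PySem.List.pyGet? l 0 == some 10))

-- ===== PORT B =====
def combs_alt (length : Int) : List (List Int) :=
  (PySem.List.pyRange 1 11 1).foldl (fun out i =>
    (PySem.List.pyRange 1 11 1).foldl (fun out j =>
      let k := length - i - j
      if (1 ≤ k ∧ k ≤ 10) ∧ i ≠ j ∧ i ≠ k ∧ j ≠ k ∧ (¬(i = 10 ∨ j = 10 ∨ k = 10) ∨ i = 10) then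
        out ++ [[i, j, k]]
      else out) out) []

-- ===== PRECONDITION & SPEC =====
def Spec_combs (length : Int) (out : List (List Int)) : Prop := out = combs_alt length
instance (length : Int) (out : List (List Int)) : Decidable (Spec_combs length out) := by unfold Spec_combs; infer_instance

-- ===== CLAIM (what is proved, stated in full; the proofs are below) =====
def Claim_equal_combs : Prop := ∀ (length : Int), Dom_combs length → Spec_combs length (combs length)

-- ===== LEMMAS AND PROOFS =====

theorem foldl_id_of_mem {α β : Type} (L : List α) (f : List β → α → List β)
    (h : ∀ acc x, x ∈ L → f acc x = acc) : ∀ acc, L.foldl f acc = acc := by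
  induction L with
  | nil => intro acc; rfl
  | cons a t ih =>
    intro acc
    simp only [List.foldl_cons]
    rw [h acc a (by simp), ih (fun acc x hx => h acc x (by simp [hx])) acc]

-- outside 3 ≤ length ≤ 30 no triple from 1..10 can sum to length, so both ports return []
theorem combs_empty_of_out (length : Int) (h : length < 3 ∨ 30 < length) :
    combs length = [] ∧ combs_alt length = [] := by
  constructor
  · show List.filter _ _ = _
    rw [foldl_id_of_mem]
    · rfl
    · intro acc i hi
      rw [foldl_id_of_mem]
      intro acc' j hj
      rw [foldl_id_of_mem]
      intro acc'' k hk
      have hi' := (PySem.List.mem_pyRange_one).mp hi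
      have hj' := (PySem.List.mem_pyRange_one).mp hj
      have hk' := (PySem.List.mem_pyRange_one).mp hk
      have : (i + j + k == length) = false := by
        simp only [beq_eq_false_iff_ne]; omega
      simp [this]
  · show List.foldl _ _ _ = _
    rw [foldl_id_of_mem]
    intro acc i hi
    rw [foldl_id_of_mem]
    intro acc' j hj
    have hi' := (PySem.List.mem_pyRange_one).mp hi
    have hj' := (PySem.List.mem_pyRange_one).mp hj
    rw [if_neg]
    rintro ⟨⟨h1, h2⟩, -⟩
    omega

-- ===== VERDICT (by name: the statement is the Claim_ definition above) =====
set_option maxRecDepth 20000 in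
theorem combs_spec : Claim_equal_combs := by
  intro length _
  unfold Spec_combs
  by_cases h : 3 ≤ length ∧ length ≤ 30
  · obtain ⟨h1, h2⟩ := h
    interval_cases length <;> decide
  · have := combs_empty_of_out length (by omega)
    rw [this.1, this.2]
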